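-- pv_equiv track=rewrite | github.com/RyotoMurata/HARMurata2 | Compare_labelled.py | _extract_penultimate_quoted
-- ===== SOURCE A (Python) =====
-- from typing import Dict, List, Optional, Tuple, Union
--
-- def _extract_penultimate_quoted(line: str) -> Optional[str]:
--     parts: List[str] = []
--     i = 0
--     while True:
--         try:
--             s = line.index('"', i)
--             e = line.index('"', s + 1)
--         except ValueError:
--             break
--         parts.append(line[s + 1 : e].strip())
--         i = e + 1
--     if len(parts) >= 2:
--         return parts[-2]
--     return None
-- ===== SOURCE B (Python) =====
-- def _extract_penultimate_quoted(line):
--     # single pass: a character-level state machine toggling at each '"'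
--     quoted = []
--     cur = None
--     for ch in line:
--         if ch == '"':
--             if cur is None:
--                 cur = []
--             else:
--                 quoted.append(''.join(cur).strip())
--                 cur = None
--         elif cur is not None:
--             cur.append(ch)
--     if len(quoted) >= 2:
--         return quoted[-2]
--     return None
-- ===== Notes on version B (the rewrite author's own statement) =====
-- stated objective: simpler
-- what changed: Replaced the repeated str.index scanning with exception control flow by a single character-level pass: a toggle state machine that collects characters between quote pairs.
import Mathlib
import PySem

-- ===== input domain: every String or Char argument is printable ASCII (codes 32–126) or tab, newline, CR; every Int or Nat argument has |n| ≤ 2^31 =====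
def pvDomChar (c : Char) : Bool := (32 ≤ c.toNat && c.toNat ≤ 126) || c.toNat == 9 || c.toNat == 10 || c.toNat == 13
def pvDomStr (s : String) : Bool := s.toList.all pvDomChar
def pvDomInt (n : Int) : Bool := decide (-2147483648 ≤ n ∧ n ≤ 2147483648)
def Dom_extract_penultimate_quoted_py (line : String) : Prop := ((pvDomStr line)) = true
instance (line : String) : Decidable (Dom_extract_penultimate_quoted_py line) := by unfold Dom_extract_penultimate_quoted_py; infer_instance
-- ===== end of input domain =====

-- B replaces A's repeated str.index scanning (with exception control flow) by a single
-- character-level pass: a toggle state machine collecting characters between quote pairs.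


-- ===== PORT A =====
-- three facts about searching for '"' , cited by aLoop's termination proof
lemma quote_prefix_iff (l : List Char) (r : Nat) :
    (['"'] <+: l.drop r) ↔ (l[r]?) = some '"' := by
  rw [← List.head?_drop]
  cases h : l.drop r with
  | nil => simp
  | cons a t =>
    simp only [List.head?_cons, Option.some.injEq]
    constructor
    · rintro ⟨u, hu⟩
      have := congrArg List.head? hu
      simpa using this.symm
    · rintro rfl; exact ⟨t, rfl⟩

lemma findFrom_gt_len (l sub : List Char) (k : Nat) (hk : l.length < k) :
    PySem.Chars.findFrom l sub (k : Int) none = -1 := by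
  have h1 : ¬ ((k : Int) < 0) := by omega
  have h2 : ((l.length : Int)) < (k : Int) := by exact_mod_cast hk
  simp only [PySem.Chars.findFrom]
  rw [if_neg h1, if_pos h2]

lemma findFrom_found (l : List Char) (k : Nat)
    (h : PySem.Chars.findFrom l ['"'] (k : Int) none ≠ -1) :
    ∃ r : Nat, PySem.Chars.findFrom l ['"'] (k : Int) none = (r : Int) ∧ k ≤ r ∧
      r < l.length ∧ (l[r]?) = some '"' ∧
      ∀ j : Nat, k ≤ j → j < r → (l[j]?) ≠ some '"' := by
  have hk : k ≤ l.length := by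
    by_contra hk
    exact h (findFrom_gt_len l ['"'] k (by omega))
  obtain ⟨h1, h2, h3⟩ := PySem.Chars.findFrom_natCast_spec l ['"'] k hk h
  set v := PySem.Chars.findFrom l ['"'] (k : Int) none with hv
  have hv0 : 0 ≤ v := le_trans (by exact_mod_cast Int.natCast_nonneg k) h1
  have hq := (quote_prefix_iff l v.toNat).1 h2
  have hlt := (List.getElem?_eq_some_iff.1 hq).1
  refine ⟨v.toNat, by omega, by omega, hlt, hq, ?_⟩
  intro j hj1 hj2 hjq
  exact h3 j hj1 (by omega) ((quote_prefix_iff l j).2 hjq)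

-- the while-True loop of A: s = line.index('"', i); e = line.index('"', s + 1);
-- parts.append(line[s+1:e].strip()); i = e + 1  (break when index raises, i.e. findFrom = -1)
def aLoop (l : List Char) (parts : List (List Char)) (i : Nat) : List (List Char) :=
  let s := PySem.Chars.findFrom l ['"'] (i : Int) none
  if hs : s = -1 then parts
  else
    let e := PySem.Chars.findFrom l ['"'] (s + 1) none
    if he : e = -1 then parts
    else aLoop l (parts ++ [PySem.Chars.strip (PySem.List.slice l (some (s + 1)) (some e))]) (e.toNat + 1)
termination_by l.length - i
decreasing_by
  obtain ⟨r, hr, hkr, hrlen, -, -⟩ := findFrom_found l i hs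
  have hc : ((r : Int) + 1) = ((r + 1 : Nat) : Int) := by push_cast; ring
  have h0 : PySem.Chars.findFrom l ['"'] (PySem.Chars.findFrom l ['"'] (i : Int) none + 1) none ≠ -1 := he
  rw [hr, hc] at h0
  obtain ⟨r2, hr2, hk2, hr2len, -, -⟩ := findFrom_found l (r + 1) h0
  rw [hr, hc, hr2, Int.toNat_natCast]
  omega

def extract_penultimate_quoted_py (line : String) : Option String :=
  let parts := aLoop line.toList [] 0
  if 2 ≤ parts.length then (PySem.List.pyGet? parts (-2)).map String.ofList else none

-- ===== PORT B =====
-- one step of B's for-loop over the characters: state = (quoted, cur)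
def bStep (st : List (List Char) × Option (List Char)) (ch : Char) : List (List Char) × Option (List Char) :=
  if ch = '"' then
    match st.2 with
    | none => (st.1, some [])
    | some cur => (st.1 ++ [PySem.Chars.strip cur], none)
  else
    match st.2 with
    | none => st
    | some cur => (st.1, some (cur ++ [ch]))

def extract_penultimate_quoted_py_alt (line : String) : Option String :=
  let quoted := (line.toList.foldl bStep ([], none)).1
  if 2 ≤ quoted.length then (PySem.List.pyGet? quoted (-2)).map String.ofList else none

-- ===== PRECONDITION & SPEC =====
def Spec_extract_penultimate_quoted_py (line : String) (out : Option String) : Prop := out = extract_penultimate_quoted_py_alt line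
instance (line : String) (out : Option String) : Decidable (Spec_extract_penultimate_quoted_py line out) := by unfold Spec_extract_penultimate_quoted_py; infer_instance

-- ===== CLAIM (what is proved, stated in full; the proofs are below) =====
def Claim_equal_extract_penultimate_quoted_py : Prop := ∀ (line : String), Dom_extract_penultimate_quoted_py line → Spec_extract_penultimate_quoted_py line (extract_penultimate_quoted_py line)

-- ===== LEMMAS AND PROOFS =====
-- the list of stripped quote-pair contents, as a structural recursion both loops compute
mutual
def pairsOf : List Char → List (List Char)
  | [] => []
  | c :: cs => if c = '"' then inQuote cs [] else pairsOf cs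
def inQuote : List Char → List Char → List (List Char)
  | [], _ => []
  | c :: cs, acc => if c = '"' then PySem.Chars.strip acc :: pairsOf cs else inQuote cs (acc ++ [c])
end

lemma pairsOf_no_quote (cs : List Char) (h : '"' ∉ cs) : pairsOf cs = [] := by
  induction cs with
  | nil => rfl
  | cons c cs ih =>
    simp only [List.mem_cons, not_or] at h
    rw [pairsOf, if_neg (fun hc => h.1 hc.symm)]
    exact ih h.2

lemma inQuote_no_quote (cs : List Char) (acc : List Char) (h : '"' ∉ cs) : inQuote cs acc = [] := by
  induction cs generalizing acc with
  | nil => rfl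
  | cons c cs ih =>
    simp only [List.mem_cons, not_or] at h
    rw [inQuote, if_neg (fun hc => h.1 hc.symm)]
    exact ih _ h.2

lemma pairsOf_append (pre cs : List Char) (h : '"' ∉ pre) : pairsOf (pre ++ cs) = pairsOf cs := by
  induction pre with
  | nil => rfl
  | cons c p ih =>
    simp only [List.mem_cons, not_or] at h
    rw [List.cons_append, pairsOf, if_neg (fun hc => h.1 hc.symm)]
    exact ih h.2

lemma inQuote_append (mid cs : List Char) (acc : List Char) (h : '"' ∉ mid) :
    inQuote (mid ++ cs) acc = inQuote cs (acc ++ mid) := by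
  induction mid generalizing acc with
  | nil => simp
  | cons c m ih =>
    simp only [List.mem_cons, not_or] at h
    rw [List.cons_append, inQuote, if_neg (fun hc => h.1 hc.symm), ih _ h.2]
    simp

lemma fold_eq (cs : List Char) : ∀ (q : List (List Char)) (st : Option (List Char)),
    (cs.foldl bStep (q, st)).1 =
      q ++ (match st with | none => pairsOf cs | some acc => inQuote cs acc) := by
  induction cs with
  | nil => intro q st; cases st <;> simp [pairsOf, inQuote]
  | cons c cs ih =>
    intro q st
    by_cases hc : c = '"'
    · subst hc
      cases st with
      | none => rw [List.foldl_cons, ih]; simp [bStep, pairsOf]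
      | some acc => rw [List.foldl_cons, ih]; simp [bStep, inQuote]
    · cases st with
      | none =>
        rw [List.foldl_cons, ih]
        simp only [bStep, if_neg hc]
        rw [pairsOf, if_neg hc]
      | some acc =>
        rw [List.foldl_cons, ih]
        simp only [bStep, if_neg hc]
        rw [inQuote, if_neg hc]

lemma decomp (l : List Char) (i r : Nat) (hir : i ≤ r) (hq : (l[r]?) = some '"')
    (hmin : ∀ j : Nat, i ≤ j → j < r → (l[j]?) ≠ some '"') :
    l.drop i = ((l.drop i).take (r - i)) ++ '"' :: l.drop (r + 1) ∧
      '"' ∉ (l.drop i).take (r - i) := by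
  obtain ⟨hlt, hget⟩ := List.getElem?_eq_some_iff.1 hq
  constructor
  · conv_lhs => rw [← List.take_append_drop (r - i) (l.drop i)]
    congr 1
    rw [List.drop_drop]
    have h2 : i + (r - i) = r := by omega
    rw [h2, List.drop_eq_getElem_cons hlt, hget]
  · intro hmem
    obtain ⟨n, hn, hx⟩ := List.mem_iff_getElem.1 hmem
    have hn2 : n < r - i ∧ n < l.length - i := by simpa [List.length_take] using hn
    have hn' : n < r - i := hn2.1
    have hni : i + n < l.length := by omega
    rw [List.getElem_take, List.getElem_drop] at hx
    exact hmin (i + n) (by omega) (by omega) (by rw [List.getElem?_eq_getElem hni, hx])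

lemma aLoop_eq (l : List Char) : ∀ (fuel i : Nat) (parts : List (List Char)),
    l.length - i ≤ fuel → i ≤ l.length →
    aLoop l parts i = parts ++ pairsOf (l.drop i) := by
  intro fuel
  induction fuel with
  | zero =>
    intro i parts hf hi
    have hieq : i = l.length := by omega
    subst hieq
    have hs : PySem.Chars.findFrom l ['"'] (l.length : Int) none = -1 := by
      rw [PySem.Chars.findFrom_natCast_eq_neg_one_iff l ['"'] l.length le_rfl]
      simp [List.drop_length]
    rw [aLoop, dif_pos hs]
    simp [List.drop_length, pairsOf]
  | succ fuel ih =>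
    intro i parts hf hi
    rw [aLoop]
    by_cases hs : PySem.Chars.findFrom l ['"'] (i : Int) none = -1
    · rw [dif_pos hs]
      have hnq : '"' ∉ l.drop i := by
        have := (PySem.Chars.findFrom_natCast_eq_neg_one_iff l ['"'] i hi).1 hs
        exact fun hm => this ((List.singleton_infix_iff _ _).2 hm)
      rw [pairsOf_no_quote _ hnq]
      simp
    · rw [dif_neg hs]
      obtain ⟨r, hr, hkr, hrlen, hq1, hmin1⟩ := findFrom_found l i hs
      have hc : ((r : Int) + 1) = ((r + 1 : Nat) : Int) := by push_cast; ring
      obtain ⟨hd1, hnq1⟩ := decomp l i r hkr hq1 hmin1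
      by_cases he : PySem.Chars.findFrom l ['"'] (((r + 1 : Nat)) : Int) none = -1
      · rw [hr, hc, dif_pos he]
        have hnq : '"' ∉ l.drop (r + 1) := by
          have := (PySem.Chars.findFrom_natCast_eq_neg_one_iff l ['"'] (r + 1) (by omega)).1 he
          exact fun hm => this ((List.singleton_infix_iff _ _).2 hm)
        rw [hd1, pairsOf_append _ _ hnq1, pairsOf, if_pos rfl, inQuote_no_quote _ _ hnq]
        simp
      · rw [hr, hc, dif_neg he]
        obtain ⟨r2, hr2, hkr2, hr2len, hq2, hmin2⟩ := findFrom_found l (r + 1) he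
        obtain ⟨hd2, hnq2⟩ := decomp l (r + 1) r2 hkr2 hq2 hmin2
        rw [hr2, Int.toNat_natCast]
        have hslice : PySem.List.slice l (some (((r + 1 : Nat)) : Int)) (some ((r2 : Nat) : Int)) =
            (l.drop (r + 1)).take (r2 - (r + 1)) := by
          rw [PySem.List.slice_natCast]
        rw [hslice]
        rw [ih (r2 + 1) _ (by omega) (by omega)]
        rw [hd1, pairsOf_append _ _ hnq1, pairsOf, if_pos rfl, hd2,
          inQuote_append _ _ _ hnq2, inQuote, if_pos rfl]
        simp
        rw [List.take_append_of_le_length (by simp [List.length_take]; omega)]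
        simp [List.take_take]

-- ===== VERDICT (by name: the statement is the Claim_ definition above) =====
theorem extract_penultimate_quoted_py_spec : Claim_equal_extract_penultimate_quoted_py := by
  intro line _
  unfold Spec_extract_penultimate_quoted_py extract_penultimate_quoted_py extract_penultimate_quoted_py_alt
  rw [aLoop_eq line.toList line.toList.length 0 [] (by omega) (by omega), fold_eq]
  simp
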